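-- pv_equiv track=rewrite | github.com/Hollings/hollingsbot3 | src/hollingsbot/cogs/chat_bots/temp_bot/identity.py | _parse_identity_response
-- ===== SOURCE A (Python) =====
-- def _parse_identity_response(response_text: str) -> tuple[str | None, str | None]:
--     """Pull NAME and AVATAR fields out of the LLM response."""
--     bot_name: str | None = None
--     avatar_prompt: str | None = None
--     for raw_line in response_text.split("\n"):
--         line = raw_line.strip()
--         if line.upper().startswith("NAME:"):
--             bot_name = line[5:].strip()
--         elif line.upper().startswith("AVATAR:"):
--             avatar_prompt = line[7:].strip()
--     return bot_name, avatar_prompt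
-- ===== SOURCE B (Python) =====
-- def _extract_field(text, prefix):
--     """Return the value of the LAST line whose stripped form starts (case-insensitively) with prefix, else None."""
--     for line in reversed(text.split("\n")):
--         stripped = line.strip()
--         if stripped.upper().startswith(prefix):
--             return stripped[len(prefix):].strip()
--     return None
--
--
-- def _parse_identity_response(response_text):
--     return (_extract_field(response_text, "NAME:"),
--             _extract_field(response_text, "AVATAR:"))
-- ===== Notes on version B (the rewrite author's own statement) =====
-- stated objective: simpler
-- what changed: Replaces A's single forward fold that threads a two-field accumulator with a generic helper that scans the lines in reverse and early-returns the first (i.e. last) matching field, called once per field.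
import Mathlib
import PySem

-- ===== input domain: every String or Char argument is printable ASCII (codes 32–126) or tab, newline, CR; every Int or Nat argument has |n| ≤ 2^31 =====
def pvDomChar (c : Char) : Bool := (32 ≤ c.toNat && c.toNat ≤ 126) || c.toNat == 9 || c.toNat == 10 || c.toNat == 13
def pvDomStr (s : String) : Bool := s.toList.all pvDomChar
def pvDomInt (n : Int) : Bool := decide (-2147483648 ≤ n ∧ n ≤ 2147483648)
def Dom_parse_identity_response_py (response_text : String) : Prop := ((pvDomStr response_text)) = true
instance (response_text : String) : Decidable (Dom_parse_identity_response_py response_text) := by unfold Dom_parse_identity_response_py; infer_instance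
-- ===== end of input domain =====

-- B replaces A's forward fold threading a two-field accumulator with a per-field reverse scan
-- that early-returns the last matching value (objective: simpler decomposition; same cost).

-- ===== PORT A =====
def parse_identity_response_py (response_text : String) : Option String × Option String :=
  ((PySem.Str.split? response_text "\n").getD []).foldl
    (fun acc raw_line =>
      let line := PySem.Str.strip raw_line
      if PySem.Str.startswith (PySem.Str.upper line) "NAME:" then
        (some (PySem.Str.strip (PySem.Str.slice line (some 5) none)), acc.2)
      else if PySem.Str.startswith (PySem.Str.upper line) "AVATAR:" then
        (acc.1, some (PySem.Str.strip (PySem.Str.slice line (some 7) none)))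
      else acc)
    (none, none)

-- ===== PORT B =====
-- helper of B: first match in the given (already reversed) line list
def pvExtractLoop (pre : String) : List String → Option String
  | [] => none
  | raw :: rest =>
    let stripped := PySem.Str.strip raw
    if PySem.Str.startswith (PySem.Str.upper stripped) pre then
      some (PySem.Str.strip (PySem.Str.slice stripped (some (PySem.Str.len pre : Int)) none))
    else pvExtractLoop pre rest

def pvExtractField (text pre : String) : Option String :=
  pvExtractLoop pre ((PySem.Str.split? text "\n").getD []).reverse

def parse_identity_response_py_alt (response_text : String) : Option String × Option String :=
  (pvExtractField response_text "NAME:", pvExtractField response_text "AVATAR:")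

-- ===== PRECONDITION & SPEC =====
def Spec_parse_identity_response_py (response_text : String) (out : Option String × Option String) : Prop := out = parse_identity_response_py_alt response_text
instance (response_text : String) (out : Option String × Option String) : Decidable (Spec_parse_identity_response_py response_text out) := by unfold Spec_parse_identity_response_py; infer_instance

-- ===== CLAIM (what is proved, stated in full; the proofs are below) =====
def Claim_equal_parse_identity_response_py : Prop := ∀ (response_text : String), Dom_parse_identity_response_py response_text → Spec_parse_identity_response_py response_text (parse_identity_response_py response_text)

-- ===== LEMMAS AND PROOFS =====

-- a stripped line cannot start with both "NAME:" and "AVATAR:"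
theorem pv_not_both (l : List Char)
    (h1 : PySem.Chars.startswith l ['N','A','M','E',':'] = true)
    (h2 : PySem.Chars.startswith l ['A','V','A','T','A','R',':'] = true) : False := by
  rw [PySem.Chars.startswith_iff] at h1 h2
  rcases h1 with ⟨t1, e1⟩; rcases h2 with ⟨t2, e2⟩
  rw [← e2] at e1
  simp at e1

theorem pv_fold_eq (ls : List String) (acc : Option String × Option String) :
    ls.foldl
      (fun acc raw_line =>
        let line := PySem.Str.strip raw_line
        if PySem.Str.startswith (PySem.Str.upper line) "NAME:" then
          (some (PySem.Str.strip (PySem.Str.slice line (some 5) none)), acc.2)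
        else if PySem.Str.startswith (PySem.Str.upper line) "AVATAR:" then
          (acc.1, some (PySem.Str.strip (PySem.Str.slice line (some 7) none)))
        else acc)
      acc
    = ((pvExtractLoop "NAME:" ls.reverse).or acc.1,
       (pvExtractLoop "AVATAR:" ls.reverse).or acc.2) := by
  induction ls using List.reverseRecOn generalizing acc with
  | nil => simp [pvExtractLoop]
  | append_singleton ls x ih =>
    rw [List.foldl_append, ih, List.reverse_append]
    simp only [List.reverse_singleton, List.singleton_append, pvExtractLoop]
    by_cases hN : PySem.Chars.startswith (PySem.Chars.upper (PySem.Chars.strip x.toList)) ['N','A','M','E',':'] = true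
    · have hA : PySem.Chars.startswith (PySem.Chars.upper (PySem.Chars.strip x.toList)) ['A','V','A','T','A','R',':'] = false := by
        by_contra h
        exact pv_not_both _ hN (by simpa using h)
      simp [hN, hA, PySem.Str.len]
    · by_cases hA : PySem.Chars.startswith (PySem.Chars.upper (PySem.Chars.strip x.toList)) ['A','V','A','T','A','R',':'] = true
      · simp [hN, hA, PySem.Str.len]
      · simp [hN, hA]

-- ===== VERDICT (by name: the statement is the Claim_ definition above) =====
theorem parse_identity_response_py_spec : Claim_equal_parse_identity_response_py := by
  intro response_text _
  unfold Spec_parse_identity_response_py parse_identity_response_py parse_identity_response_py_alt pvExtractField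
  rw [pv_fold_eq]
  simp
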